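-- pv_equiv track=rewrite | github.com/YijingLin123/ACon2 | python/data/preprocess_align_prices.py | align_to_reference
-- ===== SOURCE A (Python) =====
-- def align_to_reference(ref_data, target_data):
--     if not target_data:
--         raise ValueError('目标文件数据为空，无法扩充')
--
--     target_data.sort(key=lambda x: x['time'])
--     ref_data.sort(key=lambda x: x['time'])
--
--     idx = 0
--     last_price = None
--     ref_start = ref_data[0]['time']
--
--     # 如果目标数据在参考开始前已有记录，先用它们初始化 last_price
--     while idx < len(target_data) and target_data[idx]['time'] < ref_start:
--         last_price = target_data[idx]['price']
--         idx += 1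
--
--     if last_price is None:
--         last_price = target_data[0]['price']
--
--     aligned = []
--     for ref_entry in ref_data:
--         ref_time = ref_entry['time']
--         while idx < len(target_data) and target_data[idx]['time'] <= ref_time:
--             last_price = target_data[idx]['price']
--             idx += 1
--         aligned.append({'time': ref_time, 'price': last_price})
--     return aligned
-- ===== SOURCE B (Python) =====
-- def align_to_reference(ref_data, target_data):
--     if not target_data:
--         raise ValueError('目标文件数据为空，无法扩充')
--
--     target_data.sort(key=lambda x: x['time'])
--     ref_data.sort(key=lambda x: x['time'])
--
--     default_price = target_data[0]['price']
--     aligned = []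
--     for ref_entry in ref_data:
--         t = ref_entry['time']
--         earlier = [e['price'] for e in target_data if e['time'] <= t]
--         aligned.append({'time': t, 'price': earlier[-1] if earlier else default_price})
--     return aligned
-- ===== Notes on version B (the rewrite author's own statement) =====
-- stated objective: simpler
-- what changed: Replaces A's stateful merge pass (running index and last_price threaded through a pre-loop and a nested while) with a stateless per-reference list comprehension: for each reference time take the last target price with time <= t, falling back to the earliest target price.
import Mathlib
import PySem

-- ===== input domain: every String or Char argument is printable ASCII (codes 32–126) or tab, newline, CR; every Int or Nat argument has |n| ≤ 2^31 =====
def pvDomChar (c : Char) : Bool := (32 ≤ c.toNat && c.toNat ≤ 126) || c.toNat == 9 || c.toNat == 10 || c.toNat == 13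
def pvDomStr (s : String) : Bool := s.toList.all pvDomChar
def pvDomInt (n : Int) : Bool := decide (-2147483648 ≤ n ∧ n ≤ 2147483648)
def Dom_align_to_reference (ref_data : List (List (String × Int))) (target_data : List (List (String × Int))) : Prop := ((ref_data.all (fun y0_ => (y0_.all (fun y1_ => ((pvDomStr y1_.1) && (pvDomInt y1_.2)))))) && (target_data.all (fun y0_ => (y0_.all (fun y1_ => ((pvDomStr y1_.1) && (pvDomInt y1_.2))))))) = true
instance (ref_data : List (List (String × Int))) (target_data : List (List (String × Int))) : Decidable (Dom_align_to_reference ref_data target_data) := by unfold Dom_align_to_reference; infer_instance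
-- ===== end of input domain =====

-- B replaces A's stateful merge pass by a per-reference comprehension (simpler, not faster);
-- both A and B sort ref_data and target_data in place (same side effect), equivalence is about the return value.

-- e['time'] / e['price'] on a Python dict; entries are dicts, so duplicate keys collapse last-wins (Dict.ofList)
def pvTimeOf (e : List (String × Int)) : Int := ((PySem.Dict.ofList e).get? "time").getD 0
def pvPriceOf (e : List (String × Int)) : Int := ((PySem.Dict.ofList e).get? "price").getD 0
def pvHasKey (e : List (String × Int)) (k : String) : Bool := ((PySem.Dict.ofList e).get? k).isSome

-- ===== PORT A =====
-- the pre-loop: while idx < len(target_data) and target_data[idx]['time'] < ref_start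
def alignA_consumeLt : List (List (String × Int)) → Int → Option Int → List (List (String × Int)) × Option Int
  | [], _, o => ([], o)
  | e :: es, s, o => if pvTimeOf e < s then alignA_consumeLt es s (some (pvPriceOf e)) else (e :: es, o)

-- the inner while: while idx < len(target_data) and target_data[idx]['time'] <= ref_time
def alignA_consume : List (List (String × Int)) → Int → Int → List (List (String × Int)) × Int
  | [], _, p => ([], p)
  | e :: es, t, p => if pvTimeOf e ≤ t then alignA_consume es t (pvPriceOf e) else (e :: es, p)

-- the for loop over ref_data, threading (remaining targets, last_price, aligned)
def alignA_main : List (List (String × Int)) → List (List (String × Int)) → Int → List (List (String × Int)) → List (List (String × Int))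
  | [], _, _, acc => acc.reverse
  | r :: rs, tgt, last, acc =>
    let t := pvTimeOf r
    let st := alignA_consume tgt t last
    alignA_main rs st.1 st.2 ([("time", t), ("price", st.2)] :: acc)

-- port of A; empty target_data (ValueError) and empty ref_data (IndexError at ref_data[0]) are excluded by Pre_
def align_to_reference (ref_data : List (List (String × Int))) (target_data : List (List (String × Int))) : List (List (String × Int)) :=
  let tgtS := PySem.List.sorted target_data pvTimeOf
  let refS := PySem.List.sorted ref_data pvTimeOf
  let refStart := pvTimeOf (refS.headD [])
  let st := alignA_consumeLt tgtS refStart none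
  let last0 := st.2.getD (pvPriceOf (tgtS.headD []))
  alignA_main refS st.1 last0 []

-- ===== PORT B =====
def align_to_reference_alt (ref_data : List (List (String × Int))) (target_data : List (List (String × Int))) : List (List (String × Int)) :=
  let tgtS := PySem.List.sorted target_data pvTimeOf
  let refS := PySem.List.sorted ref_data pvTimeOf
  let dflt := pvPriceOf (tgtS.headD [])
  refS.map (fun r =>
    let t := pvTimeOf r
    let earlier := (tgtS.filter (fun e => pvTimeOf e ≤ t)).map pvPriceOf
    [("time", t), ("price", earlier.getLastD dflt)])

-- ===== PRECONDITION & SPEC =====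
def pvRefMax (ref_data : List (List (String × Int))) : Int := ((ref_data.map pvTimeOf).max?).getD 0
def pvTgtMin (target_data : List (List (String × Int))) : Int := ((target_data.map pvTimeOf).min?).getD 0

-- exactly the inputs on which the Python A returns: both lists non-empty, every entry has a 'time' key,
-- every target entry A consumes (time ≤ last reference time) has a 'price' key, and the first
-- minimal-time target entry (the one target_data[0]['price'] reads after sorting) has a 'price' key
def Pre_align_to_reference (ref_data : List (List (String × Int))) (target_data : List (List (String × Int))) : Prop :=
  ref_data ≠ [] ∧ target_data ≠ [] ∧
  (∀ e ∈ ref_data, pvHasKey e "time" = true) ∧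
  (∀ e ∈ target_data, pvHasKey e "time" = true) ∧
  (∀ e ∈ target_data, pvTimeOf e ≤ pvRefMax ref_data → pvHasKey e "price" = true) ∧
  ((target_data.find? (fun e => pvTimeOf e == pvTgtMin target_data)).all (fun e => pvHasKey e "price")) = true

instance (ref_data : List (List (String × Int))) (target_data : List (List (String × Int))) : Decidable (Pre_align_to_reference ref_data target_data) := by unfold Pre_align_to_reference; infer_instance

def pvWitness_align_to_reference : (List (List (String × Int))) × (List (List (String × Int))) :=
  ([[("time", 2)], [("time", 0)]], [[("time", 1), ("price", 5)], [("time", 3), ("price", 7)]])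

def Spec_align_to_reference (ref_data : List (List (String × Int))) (target_data : List (List (String × Int))) (out : List (List (String × Int))) : Prop := out = align_to_reference_alt ref_data target_data
instance (ref_data : List (List (String × Int))) (target_data : List (List (String × Int))) (out : List (List (String × Int))) : Decidable (Spec_align_to_reference ref_data target_data out) := by unfold Spec_align_to_reference; infer_instance

-- ===== CLAIM (what is proved, stated in full; the proofs are below) =====
def Claim_equal_align_to_reference : Prop := ∀ (ref_data : List (List (String × Int))) (target_data : List (List (String × Int))), Dom_align_to_reference ref_data target_data → Pre_align_to_reference ref_data target_data → Spec_align_to_reference ref_data target_data (align_to_reference ref_data target_data)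


-- ===== LEMMAS AND PROOFS =====

-- the "last price among targets with time ≤ t, scanned until the first later time" abstraction
def lastLE : List (List (String × Int)) → Int → Int → Int
  | [], _, p => p
  | e :: es, t, p => if pvTimeOf e ≤ t then lastLE es t (pvPriceOf e) else p

theorem consume_snd (tgt : List (List (String × Int))) (t p : Int) :
    (alignA_consume tgt t p).2 = lastLE tgt t p := by
  induction tgt generalizing p with
  | nil => rfl
  | cons e es ih =>
    simp only [alignA_consume, lastLE]
    split_ifs with h
    · exact ih _
    · rfl

theorem consume_shift (tgt : List (List (String × Int))) (t t' p : Int) (h : t ≤ t') :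
    lastLE (alignA_consume tgt t p).1 t' (alignA_consume tgt t p).2 = lastLE tgt t' p := by
  induction tgt generalizing p with
  | nil => rfl
  | cons e es ih =>
    simp only [alignA_consume]
    split_ifs with hle
    · have : pvTimeOf e ≤ t' := le_trans hle h
      rw [ih]
      simp [lastLE, this]
    · rfl

theorem consumeLt_shift (tgt : List (List (String × Int))) (s t' : Int) (o : Option Int) (d : Int) (h : s ≤ t') :
    lastLE (alignA_consumeLt tgt s o).1 t' ((alignA_consumeLt tgt s o).2.getD d) = lastLE tgt t' (o.getD d) := by
  induction tgt generalizing o with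
  | nil => rfl
  | cons e es ih =>
    simp only [alignA_consumeLt]
    split_ifs with hlt
    · have : pvTimeOf e ≤ t' := le_of_lt (lt_of_lt_of_le hlt h)
      rw [ih]
      simp [lastLE, this]
    · rfl

theorem main_spec (rs : List (List (String × Int))) (tgt : List (List (String × Int))) (p : Int)
    (acc : List (List (String × Int)))
    (hs : rs.Pairwise (fun a b => pvTimeOf a ≤ pvTimeOf b)) :
    alignA_main rs tgt p acc =
      acc.reverse ++ rs.map (fun r => [("time", pvTimeOf r), ("price", lastLE tgt (pvTimeOf r) p)]) := by
  induction rs generalizing tgt p acc with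
  | nil => simp [alignA_main]
  | cons r rs ih =>
    rcases List.pairwise_cons.mp hs with ⟨h1, h2⟩
    simp only [alignA_main]
    rw [ih _ _ _ h2]
    rw [consume_snd]
    simp only [List.map_cons, List.reverse_cons, List.append_assoc, List.cons_append, List.nil_append]
    congr 1
    congr 1
    apply List.map_congr_left
    intro b hb
    have := consume_shift tgt (pvTimeOf r) (pvTimeOf b) p (h1 b hb)
    rw [consume_snd] at this
    rw [this]

theorem lastLE_filter (tgt : List (List (String × Int))) (t d : Int)
    (hs : tgt.Pairwise (fun a b => pvTimeOf a ≤ pvTimeOf b)) :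
    lastLE tgt t d = ((tgt.filter (fun e => pvTimeOf e ≤ t)).map pvPriceOf).getLastD d := by
  induction tgt generalizing d with
  | nil => rfl
  | cons e es ih =>
    rcases List.pairwise_cons.mp hs with ⟨h1, h2⟩
    by_cases hle : pvTimeOf e ≤ t
    · simp only [lastLE, List.filter_cons, hle, decide_true, if_true,
        List.map_cons, List.getLastD_cons]
      exact ih _ h2
    · have hnil : es.filter (fun e => pvTimeOf e ≤ t) = [] := by
        rw [List.filter_eq_nil_iff]
        intro a ha
        simp only [decide_eq_true_eq]
        exact fun hc => hle (le_trans (h1 a ha) hc)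
      simp [lastLE, hle, hnil]

-- head of the sorted reference list bounds every element's time from below
theorem head_sorted_le (refS : List (List (String × Int)))
    (hs : refS.Pairwise (fun a b => pvTimeOf a ≤ pvTimeOf b)) :
    ∀ r ∈ refS, pvTimeOf (refS.headD []) ≤ pvTimeOf r := by
  cases refS with
  | nil => intro r hr; cases hr
  | cons h t =>
    rcases List.pairwise_cons.mp hs with ⟨h1, _⟩
    intro r hr
    rw [List.mem_cons] at hr
    rcases hr with hr | hr
    · simp [hr]
    · exact h1 r hr

theorem align_eq (ref_data : List (List (String × Int))) (target_data : List (List (String × Int))) :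
    align_to_reference ref_data target_data = align_to_reference_alt ref_data target_data := by
  unfold align_to_reference align_to_reference_alt
  have hrefp : (PySem.List.sorted ref_data pvTimeOf).Pairwise (fun a b => pvTimeOf a ≤ pvTimeOf b) :=
    PySem.List.sorted_pairwise ref_data pvTimeOf
  have htgtp : (PySem.List.sorted target_data pvTimeOf).Pairwise (fun a b => pvTimeOf a ≤ pvTimeOf b) :=
    PySem.List.sorted_pairwise target_data pvTimeOf
  rw [main_spec _ _ _ _ hrefp]
  simp only [List.reverse_nil, List.nil_append]
  apply List.map_congr_left
  intro r hr
  have hsh := consumeLt_shift (PySem.List.sorted target_data pvTimeOf)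
      (pvTimeOf ((PySem.List.sorted ref_data pvTimeOf).headD [])) (pvTimeOf r) none
      (pvPriceOf ((PySem.List.sorted target_data pvTimeOf).headD []))
      (head_sorted_le _ hrefp r hr)
  simp only [Option.getD_none] at hsh
  rw [hsh, lastLE_filter _ _ _ htgtp]

-- ===== VERDICT (by name: the statement is the Claim_ definition above) =====
theorem align_to_reference_spec : Claim_equal_align_to_reference := by
  intro ref_data target_data _ _
  unfold Spec_align_to_reference
  exact align_eq ref_data target_data
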